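-- pv_equiv track=rewrite | github.com/GOPI-ce/Story_Generator | story_enhancer.py | _fix_scene_endings
-- ===== SOURCE A (Python) =====
-- def _fix_scene_endings(text: str) -> str:
--     """Fix abrupt scene endings"""
--     # Add proper scene separators where missing
--     lines = text.split('\n')
--     fixed_lines = []
--
--     for i, line in enumerate(lines):
--         fixed_lines.append(line)
--         # Check if line ends abruptly without punctuation
--         if i < len(lines) - 1:
--             next_line = lines[i + 1].strip()
--             if line.strip() and not line.strip()[-1] in '.!?...' and next_line == '':
--                 # Add ellipsis for abrupt endings
--                 fixed_lines[-1] = line + '...'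
--
--     return '\n'.join(fixed_lines)
-- ===== SOURCE B (Python) =====
-- def _fix_scene_endings(text: str) -> str:
--     """Fix abrupt scene endings"""
--     out = []
--     next_blank = False  # nothing follows the last line
--     for line in reversed(text.split('\n')):
--         s = line.strip()
--         if next_blank and s and s[-1] not in '.!?':
--             line = line + '...'
--         out.append(line)
--         next_blank = (s == '')
--     return '\n'.join(reversed(out))
-- ===== Notes on version B (the rewrite author's own statement) =====
-- stated objective: alternative
-- what changed: Builds the result back-to-front: a single reversed traversal carries a one-bit flag recording whether the following line was blank, so each line is patched the moment it is visited, with no enumerate/index arithmetic, no lookahead peek and no mutation of the already-emitted list.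
import Mathlib
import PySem

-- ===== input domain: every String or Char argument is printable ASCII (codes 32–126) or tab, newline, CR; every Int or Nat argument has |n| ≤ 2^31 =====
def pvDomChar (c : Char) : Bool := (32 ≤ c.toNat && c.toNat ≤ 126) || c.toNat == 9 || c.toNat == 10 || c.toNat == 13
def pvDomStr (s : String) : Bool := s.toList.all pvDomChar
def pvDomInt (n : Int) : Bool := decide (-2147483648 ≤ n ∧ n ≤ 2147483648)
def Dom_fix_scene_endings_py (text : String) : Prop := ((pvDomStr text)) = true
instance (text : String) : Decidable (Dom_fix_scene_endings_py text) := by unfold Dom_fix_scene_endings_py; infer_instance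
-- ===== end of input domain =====

-- B builds the result back-to-front: one reversed traversal carrying a 'next line is blank'
-- flag replaces A's forward indexed loop with a lines[i+1] peek; same-cost alternative.

-- ===== PORT A =====
-- line.strip() and not line.strip()[-1] in '.!?...'
def pvAbruptA (line : String) : Bool :=
  !(PySem.Str.strip line == "") &&
    (PySem.Str.pyGet? (PySem.Str.strip line) (-1)).all (fun c => !(".!?...".toList.contains c))

-- split? is some since the separator "\n" is nonempty; .getD [] never takes the default
-- the for-loop over enumerate(lines): state fixed_lines, look-ahead at lines[i+1] via the rest
def pvGoA : List String → List String → List String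
  | [], fixed => fixed
  | line :: rest, fixed =>
    let fixed := fixed ++ [line]
    let fixed :=
      match rest with
      | [] => fixed                      -- i = len(lines) - 1: no check
      | nxt :: _ =>
        let next_line := PySem.Str.strip nxt
        if pvAbruptA line ∧ next_line = "" then
          fixed.dropLast ++ [line ++ "..."]   -- fixed_lines[-1] = line + '...'
        else fixed
    pvGoA rest fixed

def fix_scene_endings_py (text : String) : String :=
  PySem.Str.join "\n" (pvGoA (((PySem.Str.split? text "\n").getD [])) [])

-- ===== PORT B =====
-- loop body: state (out, next_blank); patch the current line if the flag is set
def pvStepB (acc : List String × Bool) (line : String) : List String × Bool :=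
  let s := PySem.Str.strip line
  let line := if acc.2 && (!(s == "") && (PySem.Str.pyGet? s (-1)).all (fun c => !(".!?".toList.contains c))) then line ++ "..." else line
  (acc.1 ++ [line], s == "")

def fix_scene_endings_py_alt (text : String) : String :=
  let lines := (PySem.Str.split? text "\n").getD []
  let r := lines.reverse.foldl pvStepB ([], false)
  PySem.Str.join "\n" r.1.reverse

-- ===== PRECONDITION & SPEC =====
def Spec_fix_scene_endings_py (text : String) (out : String) : Prop := out = fix_scene_endings_py_alt text
instance (text : String) (out : String) : Decidable (Spec_fix_scene_endings_py text out) := by unfold Spec_fix_scene_endings_py; infer_instance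

-- ===== CLAIM (what is proved, stated in full; the proofs are below) =====
def Claim_equal_fix_scene_endings_py : Prop := ∀ (text : String), Dom_fix_scene_endings_py text → Spec_fix_scene_endings_py text (fix_scene_endings_py text)

-- ===== LEMMAS AND PROOFS =====

-- the abrupt-line predicate of B's loop body, named for the proofs
def pvAbruptB (line : String) : Bool :=
  !(PySem.Str.strip line == "") &&
    (PySem.Str.pyGet? (PySem.Str.strip line) (-1)).all (fun c => !(".!?".toList.contains c))

-- common specification: pairwise, a line followed by a blank line gets '...'
def pvSpec : List String → List String
  | [] => []
  | [l] => [l]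
  | l :: n :: rest =>
    (if PySem.Str.strip n == "" && pvAbruptB l then l ++ "..." else l) :: pvSpec (n :: rest)

-- '.!?...' and '.!?' contain the same characters
theorem pvAbrupt_eq (line : String) : pvAbruptA line = pvAbruptB line := by
  unfold pvAbruptA pvAbruptB
  cases hg : PySem.Str.pyGet? (PySem.Str.strip line) (-1) with
  | none => rfl
  | some c => by_cases hc : c = '.' <;> simp [hc]

theorem pvGoA_eq_spec : ∀ (ls acc : List String), pvGoA ls acc = acc ++ pvSpec ls := by
  intro ls
  induction ls with
  | nil => intro acc; simp [pvGoA, pvSpec]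
  | cons l rest ih =>
    intro acc
    cases rest with
    | nil => simp [pvGoA, pvSpec]
    | cons n rest' =>
      show pvGoA (n :: rest')
          (if pvAbruptA l ∧ PySem.Str.strip n = "" then
            (acc ++ [l]).dropLast ++ [l ++ "..."] else acc ++ [l]) = _
      rw [ih]
      simp only [pvSpec, pvAbrupt_eq, List.dropLast_concat]
      by_cases hb : PySem.Str.strip n = "" <;> by_cases ha : pvAbruptB l = true <;>
        simp [hb, ha]

theorem pvFoldrB_eq_spec : ∀ (ls : List String),
    (ls.foldr (fun x a => pvStepB a x) ([], false)).1.reverse = pvSpec ls ∧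
    (ls.foldr (fun x a => pvStepB a x) ([], false)).2
      = (match ls with | [] => false | h :: _ => PySem.Str.strip h == "") := by
  intro ls
  induction ls with
  | nil => exact ⟨rfl, rfl⟩
  | cons l rest ih =>
    obtain ⟨ih1, ih2⟩ := ih
    refine ⟨?_, rfl⟩
    show ((rest.foldr (fun x a => pvStepB a x) ([], false)).1 ++ [_]).reverse = _
    rw [List.reverse_append, List.reverse_singleton, ih1]
    cases rest with
    | nil => rfl
    | cons n rest' =>
      simp only [pvSpec, List.singleton_append, List.cons.injEq]
      refine ⟨?_, trivial⟩
      rw [ih2]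
      unfold pvAbruptB
      rfl

theorem pvGoB_eq_spec (ls : List String) :
    (ls.reverse.foldl pvStepB ([], false)).1.reverse = pvSpec ls := by
  rw [List.foldl_reverse]
  exact (pvFoldrB_eq_spec ls).1

-- ===== VERDICT (by name: the statement is the Claim_ definition above) =====
theorem fix_scene_endings_py_spec : Claim_equal_fix_scene_endings_py := by
  intro text _
  show PySem.Str.join "\n" (pvGoA ((PySem.Str.split? text "\n").getD []) []) =
    PySem.Str.join "\n"
      ((((PySem.Str.split? text "\n").getD []).reverse.foldl pvStepB ([], false)).1.reverse)
  rw [pvGoB_eq_spec, pvGoA_eq_spec]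
  rfl
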